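-- pv_equiv track=rewrite | github.com/yonsweng/ps | codeforces/1602/c.py | solve
-- ===== SOURCE A (Python) =====
-- from math import gcd
--
-- def solve(n, a):
--     if all(ai == 0 for ai in a):
--         return ' '.join(map(str, list(range(1, n+1))))
--
--     ones = []
--     p, q = 0, 1
--     while p < 30:
--         cnt = 0
--         for ai in a:
--             cnt += 1 if ai & q != 0 else 0
--         ones.append(cnt)
--         p += 1
--         q *= 2
--
--     g = ones[0]
--     for ones_i in ones[1:]:
--         g = gcd(g, ones_i)
--
--     answer = []
--     for d in range(1, g+1):
--         if g % d == 0: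
--             answer.append(d)
--
--     return ' '.join(map(str, answer))
-- ===== SOURCE B (Python) =====
-- from math import gcd, isqrt
--
-- def solve(n, a):
--     if all(ai == 0 for ai in a):
--         return ' '.join(map(str, range(1, n + 1)))
--     g = 0
--     for p in range(30):
--         g = gcd(g, sum(1 for ai in a if ai & (1 << p) != 0))
--     small = []
--     large = []
--     for i in range(1, isqrt(g) + 1):
--         if g % i == 0:
--             small.append(i)
--             if i * i != g:
--                 large.append(g // i)
--     return ' '.join(map(str, small + large[::-1]))
-- ===== Notes on version B (the rewrite author's own statement) =====
-- stated objective: alternative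
-- what changed: B folds the per-bit counts into the gcd on the fly and replaces A's scan of every candidate 1..g by enumerating divisor pairs (d, g//d) only up to isqrt(g), emitting the small divisors ascending and the cofactors reversed.
import Mathlib
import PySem

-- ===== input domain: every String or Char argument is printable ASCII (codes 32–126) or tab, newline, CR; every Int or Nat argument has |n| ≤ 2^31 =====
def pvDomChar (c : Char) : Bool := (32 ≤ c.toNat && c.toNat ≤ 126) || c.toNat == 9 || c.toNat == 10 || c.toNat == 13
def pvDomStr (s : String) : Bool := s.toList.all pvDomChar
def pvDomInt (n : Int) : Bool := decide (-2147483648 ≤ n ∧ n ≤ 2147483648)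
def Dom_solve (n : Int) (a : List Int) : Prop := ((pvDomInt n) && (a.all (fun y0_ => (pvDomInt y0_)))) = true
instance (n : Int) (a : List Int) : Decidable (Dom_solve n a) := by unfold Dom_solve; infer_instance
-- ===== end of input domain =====

-- B folds the bit counts into the gcd on the fly and lists divisors by enumerating pairs up to isqrt(g) (objective: alternative).

-- ===== PORT A =====
-- math.gcd of two ints: the nonnegative gcd of the absolute values
def pyGcd (x y : Int) : Int := (Int.gcd x y : Int)

-- A's 'while p < 30' loop: append the count of elements with bit p set; p += 1, q *= 2
def onesGo (a : List Int) (p q : Int) (ones : List Int) : List Int :=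
  if p < 30 then
    onesGo a (p + 1) (q * 2)
      (ones ++ [a.foldl (fun cnt ai => cnt + if PySem.Int.band ai q ≠ 0 then 1 else 0) 0])
  else ones
termination_by (30 - p).toNat
decreasing_by omega

def solve (n : Int) (a : List Int) : String :=
  if a.all (fun ai => ai == 0) then
    PySem.Str.join " " ((PySem.List.pyRange 1 (n + 1) 1).map PySem.Int.toStr)
  else
    let ones := onesGo a 0 1 []
    -- ones[0] / ones[1:]: ones always has 30 elements, so index 0 is in range
    let g := (PySem.List.slice ones (some 1) none).foldl pyGcd (PySem.List.pyGetD ones 0 0)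
    let answer := (PySem.List.pyRange 1 (g + 1) 1).foldl
      (fun acc d => if PySem.Int.mod g d == 0 then acc ++ [d] else acc) []
    PySem.Str.join " " (answer.map PySem.Int.toStr)

-- ===== PORT B =====
def solve_alt (n : Int) (a : List Int) : String :=
  if a.all (fun ai => ai == 0) then
    PySem.Str.join " " ((PySem.List.pyRange 1 (n + 1) 1).map PySem.Int.toStr)
  else
    -- 1 << p is ported as 2 ^ p.toNat (p runs over range(30), so p ≥ 0: exact there)
    let g := (PySem.List.pyRange 0 30 1).foldl
      (fun g p =>
        pyGcd g ((a.filter (fun ai => PySem.Int.band ai ((2 : Int) ^ p.toNat) != 0)).length : Int)) 0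
    -- math.isqrt(g) is Nat.sqrt on g.toNat (g is a gcd, hence ≥ 0: exact there)
    let sl := (PySem.List.pyRange 1 ((Nat.sqrt g.toNat : Int) + 1) 1).foldl
      (fun (sl : List Int × List Int) i =>
        if PySem.Int.mod g i == 0 then
          (sl.1 ++ [i], if i * i != g then sl.2 ++ [PySem.Int.floordiv g i] else sl.2)
        else sl) ([], [])
    -- large[::-1] is List.reverse (PySem.List.slice?_none_none_neg_one)
    PySem.Str.join " " ((sl.1 ++ sl.2.reverse).map PySem.Int.toStr)

-- ===== PRECONDITION & SPEC =====
def Spec_solve (n : Int) (a : List Int) (out : String) : Prop := out = solve_alt n a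
instance (n : Int) (a : List Int) (out : String) : Decidable (Spec_solve n a out) := by unfold Spec_solve; infer_instance

-- ===== CLAIM (what is proved, stated in full; the proofs are below) =====
def Claim_equal_solve : Prop := ∀ (n : Int) (a : List Int), Dom_solve n a → Spec_solve n a (solve n a)

-- ===== LEMMAS AND PROOFS =====

-- number of elements of a with bit p set
def cntN (a : List Int) (p : Nat) : Nat :=
  (a.filter (fun ai => PySem.Int.band ai ((2 : Int) ^ p) != 0)).length

-- the gcd of the 30 bit counts, as a natural number
def GN (a : List Int) : Nat :=
  (List.range' 1 29).foldl (fun g p => Nat.gcd g (cntN a p)) (cntN a 0)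

-- divisors of G that are ≤ √G, ascending
def divSmall (G : Nat) : List Nat := (List.range' 1 (Nat.sqrt G)).filter (fun d => G % d == 0)
-- the matching cofactors, in the order B appends them
def divLarge (G : Nat) : List Nat := ((divSmall G).filter (fun i => i * i != G)).map (fun i => G / i)

theorem countFold (q : Int) (a : List Int) : ∀ (c : Int),
    a.foldl (fun cnt ai => cnt + if PySem.Int.band ai q ≠ 0 then 1 else 0) c
      = c + ((a.filter (fun ai => PySem.Int.band ai q != 0)).length : Int) := by
  induction a with
  | nil => simp
  | cons x t ih =>
    intro c
    rw [List.foldl_cons, List.filter_cons, ih]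
    by_cases hx : PySem.Int.band x q = 0
    · simp [hx]
    · simp [hx]
      ring

theorem onesGo_eq (a : List Int) : ∀ (m k : Nat), m + k = 30 → ∀ (acc : List Int),
    onesGo a (k : Int) ((2 : Int) ^ k) acc
      = acc ++ (List.range' k m).map (fun p => ((cntN a p : Nat) : Int)) := by
  intro m
  induction m with
  | zero =>
    intro k hk acc
    rw [onesGo]
    have hnk : ¬ ((k : Int) < 30) := by omega
    simp [hnk]
  | succ m ih =>
    intro k hk acc
    rw [onesGo]
    have hklt : (k : Int) < 30 := by omega
    rw [if_pos hklt]
    have e1 : (k : Int) + 1 = ((k + 1 : Nat) : Int) := by push_cast; ring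
    have e2 : (2 : Int) ^ k * 2 = (2 : Int) ^ (k + 1) := by rw [pow_succ]
    rw [countFold ((2 : Int) ^ k) a 0, e1, e2, ih (k + 1) (by omega)]
    rw [List.range'_succ]
    simp [cntN]

theorem foldl_pyGcd_cast (f : Nat → Nat) : ∀ (l : List Nat) (c : Nat),
    l.foldl (fun g p => pyGcd g ((f p : Nat) : Int)) ((c : Nat) : Int)
      = ((l.foldl (fun g p => Nat.gcd g (f p)) c : Nat) : Int) := by
  intro l
  induction l with
  | nil => intro c; rfl
  | cons x t ih =>
    intro c
    rw [List.foldl_cons, List.foldl_cons]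
    have h : pyGcd ((c : Nat) : Int) ((f x : Nat) : Int) = ((Nat.gcd c (f x) : Nat) : Int) := by
      simp [pyGcd, Int.gcd_natCast_natCast]
    rw [h, ih]

theorem pyRange_one_natCast (m : Nat) :
    PySem.List.pyRange 1 ((m : Int) + 1) 1 = (List.range' 1 m).map (fun (d : Nat) => (d : Int)) := by
  rw [PySem.List.pyRange_one, List.range'_eq_map_range, List.map_map]
  have hm : ((m : Int) + 1 - 1).toNat = m := by omega
  rw [hm]
  apply List.map_congr_left
  intro d _
  simp

theorem filter_map_cast (l : List Nat) (p : Int → Bool) (q : Nat → Bool)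
    (h : ∀ d : Nat, p (d : Int) = q d) :
    (l.map (fun (d : Nat) => (d : Int))).filter p = (l.filter q).map (fun (d : Nat) => (d : Int)) := by
  rw [List.filter_map]
  congr 1
  apply List.filter_congr
  intro d _
  exact h d

theorem pairFoldB (g : Int) : ∀ (l : List Int) (s0 l0 : List Int),
    l.foldl (fun (sl : List Int × List Int) i =>
        if PySem.Int.mod g i == 0 then
          (sl.1 ++ [i], if i * i != g then sl.2 ++ [PySem.Int.floordiv g i] else sl.2)
        else sl) (s0, l0)
      = (s0 ++ l.filter (fun i => PySem.Int.mod g i == 0),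
         l0 ++ ((l.filter (fun i => PySem.Int.mod g i == 0)).filter (fun i => i * i != g)).map
                 (fun i => PySem.Int.floordiv g i)) := by
  intro l
  induction l with
  | nil => intro s0 l0; simp
  | cons x t ih =>
    intro s0 l0
    rw [List.foldl_cons]
    by_cases hP : (PySem.Int.mod g x == 0) = true
    · by_cases hQ : (x * x != g) = true
      · simp only [hP, hQ, if_pos, List.filter_cons, ih]
        simp
      · simp only [hP, List.filter_cons, ih]
        simp [hQ]
    · simp only [List.filter_cons, ih]
      simp [hP]

theorem div_lt_div_of_dvd_of_lt (G i j : Nat) (hG : 0 < G) (hi : i ∣ G) (hj : j ∣ G)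
    (hij : i < j) : G / j < G / i := by
  have hi0 : 0 < i := Nat.pos_of_ne_zero (by rintro rfl; rw [zero_dvd_iff] at hi; omega)
  have hj0 : 0 < j := lt_trans hi0 hij
  have h1 : G / i * i = G := Nat.div_mul_cancel hi
  have h2 : G / j * j = G := Nat.div_mul_cancel hj
  have hdj : 0 < G / j := Nat.div_pos (Nat.le_of_dvd hG hj) hj0
  by_contra hcon
  push_neg at hcon
  have hlt : G < G := by
    calc G = G / i * i := h1.symm
    _ ≤ G / j * i := Nat.mul_le_mul_right i hcon
    _ < G / j * j := by
        have hx := (Nat.mul_lt_mul_right hdj).mpr hij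
        calc G / j * i = i * (G / j) := Nat.mul_comm _ _
        _ < j * (G / j) := hx
        _ = G / j * j := Nat.mul_comm _ _
    _ = G := h2
  omega

theorem mem_divSmall (G d : Nat) : d ∈ divSmall G ↔ 1 ≤ d ∧ d ≤ Nat.sqrt G ∧ d ∣ G := by
  simp only [divSmall, List.mem_filter, List.mem_range'_1, beq_iff_eq]
  constructor
  · rintro ⟨⟨h1, h2⟩, h3⟩
    exact ⟨h1, by omega, Nat.dvd_of_mod_eq_zero h3⟩
  · rintro ⟨h1, h2, h3⟩
    exact ⟨⟨h1, by omega⟩, Nat.dvd_iff_mod_eq_zero.mp h3⟩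

theorem mem_divLarge (G d : Nat) :
    d ∈ divLarge G ↔ ∃ i, 1 ≤ i ∧ i ≤ Nat.sqrt G ∧ i ∣ G ∧ i * i ≠ G ∧ d = G / i := by
  simp only [divLarge, List.mem_map, List.mem_filter, bne_iff_ne, ne_eq]
  constructor
  · rintro ⟨i, ⟨hiS, hisq⟩, rfl⟩
    obtain ⟨h1, h2, h3⟩ := (mem_divSmall G i).mp hiS
    exact ⟨i, h1, h2, h3, hisq, rfl⟩
  · rintro ⟨i, h1, h2, h3, h4, rfl⟩
    exact ⟨i, ⟨(mem_divSmall G i).mpr ⟨h1, h2, h3⟩, h4⟩, rfl⟩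

theorem sqrt_lt_cofactor (G i : Nat) (h1 : 1 ≤ i) (h2 : i ≤ Nat.sqrt G) (h3 : i ∣ G)
    (h4 : i * i ≠ G) : Nat.sqrt G < G / i := by
  have hs1 : 1 ≤ Nat.sqrt G := le_trans h1 h2
  have hG : 0 < G := by
    rcases Nat.eq_zero_or_pos G with rfl | hG
    · simp [Nat.sqrt_zero] at hs1
    · exact hG
  by_contra hc
  push_neg at hc
  have hq : 0 < G / i := Nat.div_pos (Nat.le_of_dvd hG h3) (by omega)
  have hmul : i * (G / i) = G := Nat.mul_div_cancel' h3
  have hge : Nat.sqrt G * Nat.sqrt G ≤ G := Nat.sqrt_le G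
  have hi_eq : i = Nat.sqrt G := by
    by_contra hne
    have hilt : i < Nat.sqrt G := lt_of_le_of_ne h2 hne
    have hstep : i * (G / i) < Nat.sqrt G * (G / i) := by
      have hx := (Nat.mul_lt_mul_right hq).mpr hilt
      omega
    have hstep2 : Nat.sqrt G * (G / i) ≤ Nat.sqrt G * Nat.sqrt G :=
      Nat.mul_le_mul_left _ hc
    omega
  rw [hi_eq] at hc hmul
  have hstep3 : Nat.sqrt G * (G / Nat.sqrt G) ≤ Nat.sqrt G * Nat.sqrt G :=
    Nat.mul_le_mul_left _ hc
  apply h4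
  rw [hi_eq]
  omega

theorem divisors_split (G : Nat) :
    (List.range' 1 G).filter (fun d => G % d == 0) = divSmall G ++ (divLarge G).reverse := by
  have pw1 : ((List.range' 1 G).filter (fun d => G % d == 0)).Pairwise (· < ·) :=
    List.Pairwise.filter _ (List.pairwise_lt_range' 1)
  have pwS : (divSmall G).Pairwise (· < ·) :=
    List.Pairwise.filter _ (List.pairwise_lt_range' 1)
  have pwL' : ((divSmall G).filter (fun i => i * i != G)).Pairwise (· < ·) :=
    List.Pairwise.filter _ pwS
  have pwL : (divLarge G).Pairwise (· > ·) := by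
    rw [divLarge, List.pairwise_map]
    refine (List.Pairwise.and_mem.mp pwL').imp ?_
    rintro x y ⟨hx, hy, hxy⟩
    have hx' := (mem_divSmall G x).mp (List.mem_of_mem_filter hx)
    have hy' := (mem_divSmall G y).mp (List.mem_of_mem_filter hy)
    have hG : 0 < G := by
      have hs1 : 1 ≤ Nat.sqrt G := le_trans hx'.1 hx'.2.1
      rcases Nat.eq_zero_or_pos G with rfl | hG
      · simp [Nat.sqrt_zero] at hs1
      · exact hG
    exact div_lt_div_of_dvd_of_lt G x y hG hx'.2.2 hy'.2.2 hxy
  have pwLrev : ((divLarge G).reverse).Pairwise (· < ·) := by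
    rw [List.pairwise_reverse]
    exact pwL
  have cross : ∀ x ∈ divSmall G, ∀ y ∈ (divLarge G).reverse, x < y := by
    intro x hx y hy
    rw [List.mem_reverse] at hy
    obtain ⟨i, hi1, hi2, hi3, hi4, rfl⟩ := (mem_divLarge G y).mp hy
    have hx' := (mem_divSmall G x).mp hx
    have hlt := sqrt_lt_cofactor G i hi1 hi2 hi3 hi4
    omega
  have pw2 : (divSmall G ++ (divLarge G).reverse).Pairwise (· < ·) :=
    List.pairwise_append.mpr ⟨pwS, pwLrev, cross⟩
  have hmem : ∀ d, d ∈ (List.range' 1 G).filter (fun d => G % d == 0)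
      ↔ d ∈ divSmall G ++ (divLarge G).reverse := by
    intro d
    rw [List.mem_filter, List.mem_range'_1, List.mem_append, List.mem_reverse, beq_iff_eq]
    constructor
    · rintro ⟨⟨h1, h2⟩, h3⟩
      have hdvd : d ∣ G := Nat.dvd_of_mod_eq_zero h3
      have hG : 0 < G := by omega
      by_cases hds : d ≤ Nat.sqrt G
      · exact Or.inl ((mem_divSmall G d).mpr ⟨h1, hds, hdvd⟩)
      · push_neg at hds
        have hq1 : 1 ≤ G / d := Nat.div_pos (Nat.le_of_dvd hG hdvd) (by omega)
        have hcan : d * (G / d) = G := Nat.mul_div_cancel' hdvd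
        have hle : G / d ≤ Nat.sqrt G := by
          by_contra hc
          push_neg at hc
          have hmul2 : (Nat.sqrt G + 1) * (Nat.sqrt G + 1) ≤ d * (G / d) :=
            Nat.mul_le_mul (by omega) (by omega)
          have hlt := Nat.lt_succ_sqrt G
          simp only [Nat.succ_eq_add_one] at hlt
          omega
        refine Or.inr ((mem_divLarge G d).mpr ⟨G / d, hq1, hle, Nat.div_dvd_of_dvd hdvd, ?_, ?_⟩)
        · intro hcontra
          have hdd : d = G / d := by
            apply Nat.eq_of_mul_eq_mul_right (show 0 < G / d by omega)
            rw [hcan, hcontra]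
          omega
        · exact (Nat.div_div_self hdvd (by omega)).symm
    · rintro (hd | hd)
      · obtain ⟨h1, h2, hdvd⟩ := (mem_divSmall G d).mp hd
        have hG : 0 < G := by
          have hs1 : 1 ≤ Nat.sqrt G := le_trans h1 h2
          rcases Nat.eq_zero_or_pos G with rfl | hG
          · simp [Nat.sqrt_zero] at hs1
          · exact hG
        have hdG : d ≤ G := Nat.le_of_dvd hG hdvd
        exact ⟨⟨h1, by omega⟩, Nat.dvd_iff_mod_eq_zero.mp hdvd⟩
      · obtain ⟨i, hi1, hi2, hi3, hi4, rfl⟩ := (mem_divLarge G d).mp hd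
        have hG : 0 < G := by
          have hs1 : 1 ≤ Nat.sqrt G := le_trans hi1 hi2
          rcases Nat.eq_zero_or_pos G with rfl | hG
          · simp [Nat.sqrt_zero] at hs1
          · exact hG
        have hq1 : 1 ≤ G / i := Nat.div_pos (Nat.le_of_dvd hG hi3) (by omega)
        have hqG : G / i ≤ G := Nat.div_le_self G i
        exact ⟨⟨hq1, by omega⟩, Nat.dvd_iff_mod_eq_zero.mp (Nat.div_dvd_of_dvd hi3)⟩
  have nd1 : ((List.range' 1 G).filter (fun d => G % d == 0)).Nodup :=
    pw1.imp (fun h => Nat.ne_of_lt h)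
  have nd2 : (divSmall G ++ (divLarge G).reverse).Nodup :=
    pw2.imp (fun h => Nat.ne_of_lt h)
  exact List.Perm.eq_of_pairwise (fun a b _ _ h1 h2 => by omega) pw1 pw2
    ((List.perm_ext_iff_of_nodup nd1 nd2).mpr hmem)

theorem cast_beq_zero (m : Nat) : ((m : Int) == 0) = (m == 0) := by
  by_cases h : m = 0 <;> simp [h]

theorem cast_bne (m k : Nat) : ((m : Int) != (k : Int)) = (m != k) := by
  by_cases h : m = k <;> simp [bne, h]

theorem range30_cons : List.range' 0 30 = 0 :: List.range' 1 29 := by decide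

theorem range30_cons' : List.range 30 = 0 :: List.range' 1 29 := by
  rw [List.range_eq_range']
  decide

theorem pyGcd_zero_cast (c : Nat) : pyGcd 0 ((c : Nat) : Int) = ((c : Nat) : Int) := by
  simp [pyGcd, Int.gcd]

theorem modP_cast (G : Nat) (d : Nat) :
    (PySem.Int.mod ((G : Nat) : Int) ((d : Nat) : Int) == 0) = (G % d == 0) := by
  rw [PySem.Int.mod_natCast, cast_beq_zero]

theorem sqP_cast (G : Nat) (d : Nat) :
    (((d : Nat) : Int) * ((d : Nat) : Int) != ((G : Nat) : Int)) = (d * d != G) := by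
  have h : ((d : Nat) : Int) * ((d : Nat) : Int) = ((d * d : Nat) : Int) := by push_cast; ring
  rw [h, cast_bne]

theorem solveA_char (n : Int) (a : List Int) (h : (a.all fun ai => ai == 0) = false) :
    solve n a = PySem.Str.join " "
      ((((List.range' 1 (GN a)).filter (fun d => GN a % d == 0)).map
          (fun (d : Nat) => (d : Int))).map PySem.Int.toStr) := by
  have hones : onesGo a 0 1 [] = (List.range' 0 30).map (fun p => ((cntN a p : Nat) : Int)) := by
    have h30 := onesGo_eq a 30 0 (by omega) []
    simpa using h30
  have hg : (PySem.List.slice (onesGo a 0 1 []) (some 1) none).foldl pyGcd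
      (PySem.List.pyGetD (onesGo a 0 1 []) 0 0) = ((GN a : Nat) : Int) := by
    rw [hones, range30_cons, List.map_cons, PySem.List.slice_from_one,
        PySem.List.pyGetD_zero_cons, List.tail_cons, List.foldl_map]
    exact foldl_pyGcd_cast (cntN a) (List.range' 1 29) (cntN a 0)
  rw [solve, if_neg (by simp [h])]
  dsimp only
  rw [hg,
      PySem.List.foldl_append_if_eq_filter (fun d => PySem.Int.mod ((GN a : Nat) : Int) d == 0),
      List.nil_append, pyRange_one_natCast (GN a),
      filter_map_cast _ _ _ (fun d => modP_cast (GN a) d)]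

theorem solveB_char (n : Int) (a : List Int) (h : (a.all fun ai => ai == 0) = false) :
    solve_alt n a = PySem.Str.join " "
      (((divSmall (GN a) ++ (divLarge (GN a)).reverse).map
          (fun (d : Nat) => (d : Int))).map PySem.Int.toStr) := by
  have h30 : (30 : Int) = ((30 : Nat) : Int) := by norm_num
  have hg : (PySem.List.pyRange 0 30 1).foldl
      (fun g p =>
        pyGcd g ((a.filter (fun ai => PySem.Int.band ai ((2 : Int) ^ p.toNat) != 0)).length : Int)) 0
      = ((GN a : Nat) : Int) := by
    rw [h30, PySem.List.pyRange_zero_nat 30, List.foldl_map]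
    simp only [Int.toNat_natCast]
    rw [range30_cons', List.foldl_cons,
        show pyGcd 0 ((a.filter (fun ai => PySem.Int.band ai ((2 : Int) ^ 0) != 0)).length : Int)
          = ((cntN a 0 : Nat) : Int) from pyGcd_zero_cast (cntN a 0)]
    exact foldl_pyGcd_cast (cntN a) (List.range' 1 29) (cntN a 0)
  rw [solve_alt, if_neg (by simp [h])]
  dsimp only
  rw [hg, Int.toNat_natCast,
      pairFoldB ((GN a : Nat) : Int) (PySem.List.pyRange 1 ((Nat.sqrt (GN a) : Int) + 1) 1) [] []]
  dsimp only
  rw [List.nil_append, List.nil_append, pyRange_one_natCast (Nat.sqrt (GN a)),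
      filter_map_cast _ _ _ (fun d => modP_cast (GN a) d),
      filter_map_cast _ _ _ (fun d => sqP_cast (GN a) d),
      List.map_map]
  have hdiv : ((((List.range' 1 (Nat.sqrt (GN a))).filter (fun d => GN a % d == 0)).filter
        (fun d => d * d != GN a)).map ((fun i => PySem.Int.floordiv ((GN a : Nat) : Int) i) ∘ (fun (d : Nat) => (d : Int))))
      = (divLarge (GN a)).map (fun (d : Nat) => (d : Int)) := by
    rw [divLarge, divSmall, List.map_map]
    apply List.map_congr_left
    intro d _
    simp [Function.comp, PySem.Int.floordiv_natCast]
  rw [hdiv, ← List.map_reverse, ← List.map_append]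
  rfl

-- ===== VERDICT (by name: the statement is the Claim_ definition above) =====
theorem solve_spec : Claim_equal_solve := by
  intro n a _
  unfold Spec_solve
  cases h : (a.all fun ai => ai == 0) with
  | true => simp only [solve, solve_alt, h, if_pos]
  | false => rw [solveA_char n a h, solveB_char n a h, divisors_split]
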